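-- pv_equiv track=rewrite | github.com/nipusapu/giraffe-re-identification-for-wellington-zoo | sift/query_sift_reid.py | build_id_image_maps
-- ===== SOURCE A (Python) =====
-- from collections import defaultdict
-- from typing import Dict, List, Tuple, Any, Optional
--
-- def build_id_image_maps(item_meta: Dict[int, Dict[str, Any]]) -> Tuple[Dict[str, int], List[str], List[str]]:
--     """
--     Build useful lookups:
--       • id_image_counts: gid → #distinct gallery images present in meta
--       • all_gids: sorted unique identities
--       • all_gallery_images: sorted unique gallery image names
--     """
--     images_by_id: Dict[str, set] = defaultdict(set)
--     gallery_images: set = set()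
--     for _, info in item_meta.items():
--         gid = str(info["gid"])
--         img = str(info["image"])
--         images_by_id[gid].add(img)
--         gallery_images.add(img)
--     id_image_counts = {gid: len(imgs) for gid, imgs in images_by_id.items()}
--     all_gids = sorted(images_by_id.keys())
--     all_gallery_images = sorted(gallery_images)
--     return id_image_counts, all_gids, all_gallery_images
-- ===== SOURCE B (Python) =====
-- def build_id_image_maps(item_meta):
--     """Sorting instead of hashing: no sets or dict-of-sets are maintained.
--     Distinct images per gid are counted by a per-gid filter followed by
--     sort + adjacent-deduplication; the unique sorted lists come from the
--     same sort/adjacent-dedup pass over the flat pair list."""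
--     pairs = [(str(info["gid"]), str(info["image"])) for info in item_meta.values()]
--     gids_in_order = list(dict.fromkeys(g for g, _ in pairs))
--     id_image_counts = {
--         g: len(_dedup_adjacent(sorted(i for g2, i in pairs if g2 == g)))
--         for g in gids_in_order
--     }
--     all_gids = sorted(gids_in_order)
--     all_gallery_images = _dedup_adjacent(sorted(i for _, i in pairs))
--     return id_image_counts, all_gids, all_gallery_images
--
--
-- def _dedup_adjacent(ys):
--     # keep an element iff it differs from the previously kept one
--     out = []
--     for y in ys:
--         if not out or y != out[-1]:
--             out.append(y)
--     return out
-- ===== Notes on version B (the rewrite author's own statement) =====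
-- stated objective: alternative
-- what changed: Replaces A's incrementally maintained dict-of-sets and running hash set by sorting: a flat pair list is built once, distinct images per gid are counted by a per-gid filter plus sort and adjacent-dedup scan, and the unique sorted outputs come from the same sort/adjacent-dedup pass instead of sorting hash sets.
import Mathlib
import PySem

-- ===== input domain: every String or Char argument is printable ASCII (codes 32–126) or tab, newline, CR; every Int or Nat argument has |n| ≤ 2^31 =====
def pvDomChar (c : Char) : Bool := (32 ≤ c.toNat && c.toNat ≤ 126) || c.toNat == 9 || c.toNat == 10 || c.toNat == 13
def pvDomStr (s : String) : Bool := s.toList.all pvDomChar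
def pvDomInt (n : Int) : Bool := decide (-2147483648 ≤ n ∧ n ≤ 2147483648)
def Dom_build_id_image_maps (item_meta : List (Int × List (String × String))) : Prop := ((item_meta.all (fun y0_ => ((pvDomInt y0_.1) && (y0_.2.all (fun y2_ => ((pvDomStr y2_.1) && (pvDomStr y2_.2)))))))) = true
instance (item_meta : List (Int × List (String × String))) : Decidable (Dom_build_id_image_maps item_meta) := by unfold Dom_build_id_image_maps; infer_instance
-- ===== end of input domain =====

-- B replaces A's dict-of-sets + running hash set by sorting: distinct images per gid are
-- counted by a per-gid filter plus sort/adjacent-dedup (alternative decomposition; not faster).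


-- info[k] (str(...) on a str value is the identity); Pre_ guarantees the key is present,
-- so the "" default of getD is never the result on admitted inputs.
def pvInfoGet (info : List (String × String)) (k : String) : String :=
  (PySem.Dict.ofList info).getD k ""

-- ===== PORT A =====
def build_id_image_maps (item_meta : List (Int × List (String × String))) : (List (String × Int)) × List String × List String :=
  -- for _, info in item_meta.items(): images_by_id[gid].add(img); gallery_images.add(img)
  let st := ((PySem.Dict.ofList item_meta).values).foldl
    (fun (st : PySem.Dict String (PySem.Set String) × PySem.Set String) info =>
      let gid := pvInfoGet info "gid"
      let img := pvInfoGet info "image"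
      (st.1.modify gid PySem.Set.empty (fun s => s.add img), st.2.add img))
    (PySem.Dict.empty, PySem.Set.empty)
  let id_image_counts := st.1.items.map (fun gi => (gi.1, PySem.Set.len gi.2))
  let all_gids := PySem.List.sorted st.1.keys (fun x => x)
  let all_gallery_images := PySem.List.sorted st.2 (fun x => x)
  (id_image_counts, all_gids, all_gallery_images)

-- ===== PORT B =====
-- _dedup_adjacent: 'for y in ys: if not out or y != out[-1]: out.append(y)'
-- (append y unless out is nonempty with last element y, i.e. unless out.getLast? = some y)
def pvDedupAdjacent (ys : List String) : List String :=
  ys.foldl (fun out y => if out.getLast? = some y then out else out ++ [y]) []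

def build_id_image_maps_alt (item_meta : List (Int × List (String × String))) : (List (String × Int)) × List String × List String :=
  -- pairs = [(str(info["gid"]), str(info["image"])) for info in item_meta.values()]
  let pairs := ((PySem.Dict.ofList item_meta).values).map
    (fun info => (pvInfoGet info "gid", pvInfoGet info "image"))
  -- gids_in_order = list(dict.fromkeys(g for g, _ in pairs))
  let gids_in_order := PySem.List.dedup (pairs.map (fun p => p.1))
  -- {g: len(_dedup_adjacent(sorted(i for g2, i in pairs if g2 == g))) for g in gids_in_order}
  let id_image_counts := (gids_in_order.foldl
    (fun (d : PySem.Dict String Int) g =>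
      d.insert g ((pvDedupAdjacent (PySem.List.sorted
        ((pairs.filter (fun p => p.1 == g)).map (fun p => p.2)) (fun x => x))).length : Int))
    PySem.Dict.empty).items
  let all_gids := PySem.List.sorted gids_in_order (fun x => x)
  let all_gallery_images := pvDedupAdjacent (PySem.List.sorted (pairs.map (fun p => p.2)) (fun x => x))
  (id_image_counts, all_gids, all_gallery_images)

-- ===== PRECONDITION & SPEC =====
-- Pre_ requires every entry's info dict to contain both "gid" and "image" keys; elsewhere
-- Python A raises KeyError (as does B).
def Pre_build_id_image_maps (item_meta : List (Int × List (String × String))) : Prop :=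
  ∀ kv ∈ item_meta, "gid" ∈ kv.2.map Prod.fst ∧ "image" ∈ kv.2.map Prod.fst
instance (item_meta : List (Int × List (String × String))) : Decidable (Pre_build_id_image_maps item_meta) := by unfold Pre_build_id_image_maps; infer_instance

def pvWitness_build_id_image_maps : (List (Int × List (String × String))) :=
  [(0, [("gid", "a"), ("image", "x")]), (1, [("gid", "a"), ("image", "y")])]

def Spec_build_id_image_maps (item_meta : List (Int × List (String × String))) (out : (List (String × Int)) × List String × List String) : Prop := out = build_id_image_maps_alt item_meta
instance (item_meta : List (Int × List (String × String))) (out : (List (String × Int)) × List String × List String) : Decidable (Spec_build_id_image_maps item_meta out) := by unfold Spec_build_id_image_maps; infer_instance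

-- ===== CLAIM (what is proved, stated in full; the proofs are below) =====
def Claim_equal_build_id_image_maps : Prop := ∀ (item_meta : List (Int × List (String × String))), Dom_build_id_image_maps item_meta → Pre_build_id_image_maps item_meta → Spec_build_id_image_maps item_meta (build_id_image_maps item_meta)

-- ===== LEMMAS AND PROOFS =====

-- the value stored under g by A's modify-loop: the images of g's entries, in order
lemma pv_getD_fold (l : List (String × String)) (d : PySem.Dict String (PySem.Set String)) (g : String) :
    (l.foldl (fun d p => d.modify p.1 PySem.Set.empty (fun s => s.add p.2)) d).getD g PySem.Set.empty
      = PySem.Set.update (d.getD g PySem.Set.empty) ((l.filter (fun p => p.1 == g)).map Prod.snd) := by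
  induction l generalizing d with
  | nil => simp [PySem.Set.update_nil]
  | cons p l ih =>
    simp only [List.foldl_cons, ih, List.filter_cons]
    by_cases h : p.1 = g
    · simp [h, PySem.Set.update_cons]
    · have h' : ¬ (p.1 == g) = true := by simpa using h
      simp [PySem.Dict.getD_modify, Ne.symm h, h']

-- in a strictly increasing list every element is ≤ the last one
lemma pv_le_getLast (out : List String) (h : out.Pairwise (· < ·)) (z : String) (hz : z ∈ out)
    (l : String) (hl : out.getLast? = some l) : z ≤ l := by
  induction out with
  | nil => cases hz
  | cons x t ih =>
    cases t with
    | nil =>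
      simp at hz hl; simp [hz, hl]
    | cons y s =>
      rw [List.getLast?_cons_cons] at hl
      rcases List.mem_cons.1 hz with hzx | hzt
      · subst hzx
        have hlm : l ∈ y :: s := List.mem_of_getLast? hl
        exact le_of_lt ((List.pairwise_cons.1 h).1 l hlm)
      · exact ih (List.pairwise_cons.1 h).2 hzt hl

-- invariant of B's adjacent-dedup loop over a sorted list
lemma pv_dedupAdj_inv (ys : List String) (out : List String)
    (hys : ys.Pairwise (· ≤ ·)) (hout : out.Pairwise (· < ·))
    (hle : ∀ z ∈ out, ∀ y ∈ ys, z ≤ y) :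
    (ys.foldl (fun out y => if out.getLast? = some y then out else out ++ [y]) out).Pairwise (· < ·) ∧
    (∀ w, w ∈ ys.foldl (fun out y => if out.getLast? = some y then out else out ++ [y]) out ↔ w ∈ out ∨ w ∈ ys) := by
  induction ys generalizing out with
  | nil => exact ⟨hout, fun w => by simp⟩
  | cons y t ih =>
    obtain ⟨hy, ht⟩ := List.pairwise_cons.1 hys
    simp only [List.foldl_cons]
    by_cases hlast : out.getLast? = some y
    · rw [if_pos hlast]
      have hmem : y ∈ out := List.mem_of_getLast? hlast
      obtain ⟨h1, h2⟩ := ih out ht hout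
        (fun z hz b hb => le_trans (hle z hz y (List.mem_cons_self)) (hy b hb))
      refine ⟨h1, fun w => ?_⟩
      rw [h2 w]
      constructor
      · rintro (h | h) <;> simp [h]
      · rintro (h | h)
        · exact Or.inl h
        · rcases List.mem_cons.1 h with rfl | h
          · exact Or.inl hmem
          · exact Or.inr h
    · rw [if_neg hlast]
      have hout' : (out ++ [y]).Pairwise (· < ·) := by
        rw [List.pairwise_append]
        refine ⟨hout, List.pairwise_singleton _ _, fun z hz b hb => ?_⟩
        rw [List.mem_singleton] at hb; rw [hb]
        cases hgl : out.getLast? with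
        | none => exact absurd (List.getLast?_eq_none_iff.1 hgl) (List.ne_nil_of_mem hz)
        | some l =>
          have h1 : z ≤ l := pv_le_getLast out hout z hz l hgl
          have h2 : l ≤ y := hle l (List.mem_of_getLast? hgl) y List.mem_cons_self
          have h3 : l ≠ y := fun he => hlast (he ▸ hgl)
          exact lt_of_le_of_lt h1 (lt_of_le_of_ne h2 h3)
      obtain ⟨h1, h2⟩ := ih (out ++ [y]) ht hout'
        (fun z hz b hb => by
          rcases List.mem_append.1 hz with hz | hz
          · exact le_trans (hle z hz y List.mem_cons_self) (hy b hb)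
          · rw [List.mem_singleton] at hz; subst hz; exact hy b hb)
      refine ⟨h1, fun w => ?_⟩
      rw [h2 w]
      simp [or_assoc]

-- adjacent-dedup of a sorted list IS the sorted list of the distinct elements
lemma pv_dedupAdj_sorted (l : List String) :
    pvDedupAdjacent (PySem.List.sorted l (fun x => x) false)
      = PySem.List.sorted (PySem.Set.ofList l) (fun x => x) false := by
  have hs : (PySem.List.sorted l (fun x => x) false).Pairwise (· ≤ ·) :=
    PySem.List.sorted_pairwise l (fun x => x)
  obtain ⟨hpw, hmem⟩ := pv_dedupAdj_inv (PySem.List.sorted l (fun x => x) false) []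
    hs (List.Pairwise.nil) (by simp)
  unfold pvDedupAdjacent
  have hperm : (List.foldl (fun out y => if out.getLast? = some y then out else out ++ [y]) []
      (PySem.List.sorted l (fun x => x) false)).Perm (PySem.Set.ofList l) := by
    have hnd1 : (List.foldl (fun out y => if out.getLast? = some y then out else out ++ [y]) []
        (PySem.List.sorted l (fun x => x) false)).Nodup := hpw.imp (fun h => ne_of_lt h)
    rw [List.perm_ext_iff_of_nodup hnd1 (PySem.Set.nodup_ofList l)]
    intro a
    rw [hmem a, PySem.Set.mem_ofList, PySem.List.mem_sorted]
    simp
  exact (PySem.List.sorted_eq_of_perm_of_pairwise_lt _ _ (fun x => x) hperm hpw).symm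

-- ===== VERDICT (by name: the statement is the Claim_ definition above) =====
theorem build_id_image_maps_spec : Claim_equal_build_id_image_maps := by
  intro item_meta _ _
  unfold Spec_build_id_image_maps build_id_image_maps build_id_image_maps_alt
  set vals := (PySem.Dict.ofList item_meta).values with hv
  set f : List (String × String) → String × String :=
    fun info => (pvInfoGet info "gid", pvInfoGet info "image") with hf
  set xs := vals.map f with hxs
  have hfold :
      vals.foldl
        (fun (st : PySem.Dict String (PySem.Set String) × PySem.Set String) info =>
          (st.1.modify (pvInfoGet info "gid") PySem.Set.empty
              (fun s => s.add (pvInfoGet info "image")),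
           st.2.add (pvInfoGet info "image")))
        (PySem.Dict.empty, PySem.Set.empty)
        = (xs.foldl (fun d p => d.modify p.1 PySem.Set.empty (fun s => s.add p.2)) PySem.Dict.empty,
           xs.foldl (fun s p => s.add p.2) PySem.Set.empty) := by
    rw [hxs, List.foldl_map, List.foldl_map, ← PySem.List.foldl_prod_mk]
  simp only [hfold]
  set D := xs.foldl (fun d p => d.modify p.1 PySem.Set.empty (fun s => s.add p.2)) PySem.Dict.empty with hD
  have hkeys : D.keys = PySem.Set.ofList (xs.map Prod.fst) := by
    rw [hD, PySem.Dict.keys_foldl_modify_key xs Prod.fst PySem.Set.empty (fun _ p s => s.add p.2)]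
    simp [PySem.Set.update_nil_left]
  have hnd : D.keys.Nodup := by
    rw [hkeys]; exact PySem.Set.nodup_ofList _
  have hgal : xs.foldl (fun (s : PySem.Set String) p => s.add p.2) PySem.Set.empty
      = PySem.Set.ofList (xs.map Prod.snd) := by
    rw [← PySem.Set.update_map_eq_foldl_add, PySem.Set.update_empty]
  have hget : ∀ g, D.getD g PySem.Set.empty
      = PySem.Set.ofList ((xs.filter (fun p => p.1 == g)).map Prod.snd) := by
    intro g
    rw [hD, pv_getD_fold]
    simp [PySem.Set.update_nil_left]
  have hdedup : PySem.List.dedup (xs.map (fun p => p.1)) = PySem.Set.ofList (xs.map Prod.fst) := by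
    simp [PySem.List.dedup_eq_ofList]
  refine Prod.ext ?_ (Prod.ext ?_ ?_)
  · -- id_image_counts
    show D.items.map (fun gi => (gi.1, PySem.Set.len gi.2)) = _
    rw [PySem.Dict.items_eq_map_keys D hnd PySem.Set.empty, List.map_map, hkeys]
    rw [hdedup, PySem.Dict.items_foldl_insert_fresh _ _ _ _
      (fun a _ => PySem.Dict.contains_empty a) (by simp)]
    have hie : (PySem.Dict.empty : PySem.Dict String Int).items = [] := rfl
    rw [hie, List.nil_append]
    refine List.map_congr_left ?_
    intro k _
    simp only [Function.comp]
    rw [hget k, pv_dedupAdj_sorted]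
    show (k, ((PySem.Set.ofList ((xs.filter (fun p => p.1 == k)).map Prod.snd)).length : Int)) = _
    rw [PySem.List.length_sorted]
  · -- all_gids
    show PySem.List.sorted D.keys (fun x => x) = _
    rw [hkeys, hdedup]
  · -- all_gallery_images
    show PySem.List.sorted (xs.foldl (fun (s : PySem.Set String) p => s.add p.2) PySem.Set.empty) (fun x => x) = _
    rw [hgal, ← pv_dedupAdj_sorted]
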